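-- pv_equiv track=rewrite | github.com/hollohan/RummySim | findTrips.py | findTrips
-- ===== SOURCE A (Python) =====
-- def findTrips(cards):
-- 	'''
-- 	print ('this is the list that was recv\'d')
-- 	print ('--------------------------------')
-- 	print (cards)
-- 	'''
-- 	import copy
-- 	cardsCopy = copy.deepcopy(cards)
--
-- 	# test for 3 of a kind
-- 	cardsCopy.sort()
-- 	'''
-- 	print ('this is a copy sorted by value')
-- 	print ('------------------------------')
-- 	print (cardsCopy)
-- 	'''
--
-- 	tripsCount = 0
-- 	tripsHolder = []
-- 	for i in range(len(cardsCopy)-2):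
-- 		if cardsCopy[i][0] == cardsCopy[i+1][0] == cardsCopy[i+2][0]:	# then there's def trips
-- 			# load each card to var
-- 			first  = cardsCopy[i]
-- 			second = cardsCopy[i+1]
-- 			third  = cardsCopy[i+2]
--
-- 			tripsHolder.append([first, second, third])
-- 			'''
-- 			print ('trips have been found')
-- 			print ('---------------------')
-- 			print (str(first) + ' ' + str(second) + ' ' + str(third))
-- 			'''
-- 			tripsCount = tripsCount + 1
--
-- 	# summary
-- 	#print (str(tripsCount) + ' sets of trips found')
-- 	'''
-- 	# error test
-- 	if tripsCount != 3:
-- 		print (' - 3 SETS OF TRIPS NOT DETECTED - ')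
-- 		exit()
-- 	'''
--
-- 	return tripsHolder
-- ===== SOURCE B (Python) =====
-- import copy
--
--
-- def findTrips(cards):
--     cardsCopy = copy.deepcopy(cards)
--     trips = []
--     # bucket decomposition: for each distinct card value (in sorted order),
--     # sort just that value's cards and emit every window of three as a trip
--     for v in sorted(set(c[0] for c in cardsCopy)):
--         g = sorted(c for c in cardsCopy if c[0] == v)
--         trips += [list(t) for t in zip(g, g[1:], g[2:])]
--     return trips
-- ===== Notes on version B (the rewrite author's own statement) =====
-- stated objective: alternative
-- what changed: Replaces A's global sort followed by an index scan that tests equality of every consecutive triple with a bucket decomposition: collect the distinct card values, and for each value in sorted order sort only that value's cards and emit every 3-window of the bucket unconditionally via zip.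
import Mathlib
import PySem

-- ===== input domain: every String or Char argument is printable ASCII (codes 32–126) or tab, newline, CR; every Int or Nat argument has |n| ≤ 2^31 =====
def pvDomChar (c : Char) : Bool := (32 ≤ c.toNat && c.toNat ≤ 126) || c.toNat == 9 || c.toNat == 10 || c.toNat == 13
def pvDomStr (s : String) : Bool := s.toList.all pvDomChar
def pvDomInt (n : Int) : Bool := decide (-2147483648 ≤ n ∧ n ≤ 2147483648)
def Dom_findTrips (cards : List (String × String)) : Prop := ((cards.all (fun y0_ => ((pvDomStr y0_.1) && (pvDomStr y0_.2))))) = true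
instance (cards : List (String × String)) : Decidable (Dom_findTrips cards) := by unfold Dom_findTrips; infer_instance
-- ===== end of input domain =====

-- B replaces A's global sort + conditional index scan with a per-value bucket decomposition (alternative algorithm, same cost).

-- ===== PORT A =====
def findTrips (cards : List (String × String)) : List (List (String × String)) :=
  let cardsCopy := PySem.List.sorted2 cards (fun x => x.1) (fun x => x.2)
  (PySem.List.pyRange 0 ((cardsCopy.length : Int) - 2) 1).foldl
    (fun tripsHolder i =>
      if (PySem.List.pyGetD cardsCopy i ("", "")).1 == (PySem.List.pyGetD cardsCopy (i+1) ("", "")).1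
          && (PySem.List.pyGetD cardsCopy (i+1) ("", "")).1 == (PySem.List.pyGetD cardsCopy (i+2) ("", "")).1 then
        let first := PySem.List.pyGetD cardsCopy i ("", "")
        let second := PySem.List.pyGetD cardsCopy (i+1) ("", "")
        let third := PySem.List.pyGetD cardsCopy (i+2) ("", "")
        tripsHolder ++ [[first, second, third]]
      else tripsHolder) []

-- ===== PORT B =====
-- B: for each distinct card value in sorted order, sort that value's bucket and emit every
-- zip(g, g[1:], g[2:]) window as a trip.
def findTrips_alt (cards : List (String × String)) : List (List (String × String)) :=
  let cardsCopy := cards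
  (PySem.List.sorted (PySem.Set.ofList (cardsCopy.map (fun c => c.1))) (fun x => x) false).foldl
    (fun trips v =>
      let g := PySem.List.sorted2 (cardsCopy.filter (fun c => c.1 == v)) (fun x => x.1) (fun x => x.2)
      trips ++
        ((g.zip (PySem.List.slice g (some 1) none)).zip (PySem.List.slice g (some 2) none)).map
          (fun t => [t.1.1, t.1.2, t.2])) []

-- ===== PRECONDITION & SPEC =====
def Spec_findTrips (cards : List (String × String)) (out : List (List (String × String))) : Prop := out = findTrips_alt cards
instance (cards : List (String × String)) (out : List (List (String × String))) : Decidable (Spec_findTrips cards out) := by unfold Spec_findTrips; infer_instance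

-- ===== CLAIM (what is proved, stated in full; the proofs are below) =====
def Claim_equal_findTrips : Prop := ∀ (cards : List (String × String)), Dom_findTrips cards → Spec_findTrips cards (findTrips cards)

-- ===== LEMMAS AND PROOFS =====

-- the consecutive-triple scan of a list, and all 3-windows of a list
def pvW : List (String × String) → List (List (String × String))
  | a :: b :: c :: t => (if a.1 == b.1 && b.1 == c.1 then [[a, b, c]] else []) ++ pvW (b :: c :: t)
  | _ => []

def pvWins : List (String × String) → List (List (String × String))
  | a :: b :: c :: t => [a, b, c] :: pvWins (b :: c :: t)
  | _ => []

lemma natscanA (s : List (String × String)) (acc : List (List (String × String))) :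
    (List.range (s.length - 2)).foldl
      (fun acc k =>
        if (s.getD k ("", "")).1 == (s.getD (k+1) ("", "")).1
            && (s.getD (k+1) ("", "")).1 == (s.getD (k+2) ("", "")).1 then
          acc ++ [[s.getD k ("", ""), s.getD (k+1) ("", ""), s.getD (k+2) ("", "")]]
        else acc) acc = acc ++ pvW s := by
  induction s generalizing acc with
  | nil => simp [pvW]
  | cons a t IH =>
    rcases t with _ | ⟨b, _ | ⟨c, u⟩⟩
    · simp [pvW]
    · simp [pvW]
    · have hlen : (a :: b :: c :: u).length - 2 = u.length + 1 := by simp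
      rw [hlen, List.range_succ_eq_map, List.foldl_cons, List.foldl_map]
      have hstep : ∀ (acc' : List (List (String × String))),
          (List.range u.length).foldl
            (fun acc k =>
              if ((a :: b :: c :: u).getD (k+1) ("", "")).1 == ((a :: b :: c :: u).getD (k+1+1) ("", "")).1
                  && ((a :: b :: c :: u).getD (k+1+1) ("", "")).1 == ((a :: b :: c :: u).getD (k+1+2) ("", "")).1 then
                acc ++ [[(a :: b :: c :: u).getD (k+1) ("", ""), (a :: b :: c :: u).getD (k+1+1) ("", ""), (a :: b :: c :: u).getD (k+1+2) ("", "")]]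
              else acc) acc' = acc' ++ pvW (b :: c :: u) := by
        intro acc'
        have h2 : (b :: c :: u).length - 2 = u.length := by simp
        have := IH acc'
        rw [h2] at this
        convert this using 2
      simp only [Nat.succ_eq_add_one] at hstep ⊢
      rw [hstep]
      simp only [List.getD_cons_zero, List.getD_cons_succ, pvW]
      split <;> simp

lemma pyRangeN (n : Nat) :
    PySem.List.pyRange 0 ((n : Int) - 2) 1 = (List.range (n - 2)).map (Nat.cast : Nat → Int) := by
  rw [PySem.List.pyRange_one]
  have : ((n : Int) - 2 - 0).toNat = n - 2 := by omega
  rw [this]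
  apply List.map_congr_left
  intro k _
  simp

lemma bridgeA (s : List (String × String)) :
    (PySem.List.pyRange 0 ((s.length : Int) - 2) 1).foldl
      (fun tripsHolder i =>
        if (PySem.List.pyGetD s i ("", "")).1 == (PySem.List.pyGetD s (i+1) ("", "")).1
            && (PySem.List.pyGetD s (i+1) ("", "")).1 == (PySem.List.pyGetD s (i+2) ("", "")).1 then
          tripsHolder ++ [[PySem.List.pyGetD s i ("", ""), PySem.List.pyGetD s (i+1) ("", ""), PySem.List.pyGetD s (i+2) ("", "")]]
        else tripsHolder) [] = pvW s := by
  rw [pyRangeN, List.foldl_map]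
  have hcast : ∀ (k : Nat) (m : Nat),
      PySem.List.pyGetD s ((k : Int) + (m : Int)) ("", "") = s.getD (k + m) ("", "") := by
    intro k m
    rw [show (k : Int) + (m : Int) = ((k + m : Nat) : Int) by push_cast; ring,
        PySem.List.pyGetD_natCast]
  have h0 : ∀ (k : Nat), PySem.List.pyGetD s (k : Int) ("", "") = s.getD k ("", "") :=
    fun k => PySem.List.pyGetD_natCast s k _
  have h1 : ∀ (k : Nat), PySem.List.pyGetD s ((k : Int) + 1) ("", "") = s.getD (k + 1) ("", "") :=
    fun k => by simpa using hcast k 1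
  have h2 : ∀ (k : Nat), PySem.List.pyGetD s ((k : Int) + 2) ("", "") = s.getD (k + 2) ("", "") :=
    fun k => by simpa using hcast k 2
  simp only [h0, h1, h2]
  exact (natscanA s []).trans (by simp)

-- scan through a constant-value block followed by a rest starting on a different value
lemma pvW_append (v : String) (g r : List (String × String))
    (hg : ∀ x ∈ g, x.1 = v) (hr : ∀ b ∈ r.head?, b.1 ≠ v) :
    pvW (g ++ r) = pvWins g ++ pvW r := by
  induction g with
  | nil => simp [pvWins]
  | cons a g' IH =>
    have ha : a.1 = v := hg a (by simp)
    have hg' : ∀ x ∈ g', x.1 = v := fun x hx => hg x (by simp [hx])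
    rcases g' with _ | ⟨b, _ | ⟨c, u⟩⟩
    · rcases r with _ | ⟨x, _ | ⟨y, w⟩⟩
      · simp [pvW, pvWins]
      · simp [pvW, pvWins]
      · have hx : x.1 ≠ v := hr x (by simp)
        simp only [List.cons_append, List.nil_append, pvW, pvWins]
        have : (a.1 == x.1) = false := by
          simp [ha]; exact fun h => hx h.symm
        simp [this]
    · have hb : b.1 = v := hg' b (by simp)
      rcases r with _ | ⟨x, w⟩
      · simp [pvW, pvWins]
      · have hx : x.1 ≠ v := hr x (by simp)
        have hbx : (b.1 == x.1) = false := by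
          simp [hb]; exact fun h => hx h.symm
        simp only [List.cons_append, List.nil_append, pvW, pvWins] at *
        simp [hbx]
        have := IH (by intro x hx2; exact hg' x hx2)
        simpa [pvW, pvWins, hbx] using this
    · have hb : b.1 = v := hg' b (by simp)
      have hc : c.1 = v := hg' c (by simp)
      simp only [List.cons_append, pvW, pvWins]
      have : (a.1 == b.1 && b.1 == c.1) = true := by simp [ha, hb, hc]
      rw [this]
      have := IH hg'
      simp only [List.cons_append] at this ⊢
      simp [this]

-- the comparator sorted2 uses on (value, suit) pairs, and its meaning in the lexicographic order
def pvLt (a b : String × String) : Bool :=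
  decide (a.1 < b.1) || (!decide (b.1 < a.1) && decide (a.2 < b.2))

lemma pvLt_iff (a b : String × String) : pvLt a b = true ↔ toLex a < toLex b := by
  rw [Prod.Lex.lt_iff]
  simp only [pvLt, Bool.or_eq_true, Bool.and_eq_true, Bool.not_eq_true', decide_eq_true_eq,
    decide_eq_false_iff_not, not_lt, ofLex_toLex]
  constructor
  · rintro (h | ⟨h1, h2⟩)
    · exact Or.inl h
    · rcases lt_or_eq_of_le h1 with h | h
      · exact Or.inl h
      · exact Or.inr ⟨h, h2⟩
  · rintro (h | ⟨h1, h2⟩)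
    · exact Or.inl h
    · exact Or.inr ⟨le_of_eq h1, h2⟩

lemma pvLe_of_not_lt (a b : String × String) (h : pvLt a b = false) : toLex b ≤ toLex a := by
  by_contra hc
  have : toLex a < toLex b := lt_of_not_ge hc
  rw [← pvLt_iff] at this
  simp [h] at this

lemma insertBy_pairwise (x : String × String) (acc : List (String × String))
    (h : acc.Pairwise (fun a b => toLex a ≤ toLex b)) :
    (PySem.List.insertBy pvLt x acc).Pairwise (fun a b => toLex a ≤ toLex b) := by
  induction acc with
  | nil => simp [PySem.List.insertBy]
  | cons y ys IH =>
    rcases h with _ | ⟨hy, hys⟩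
    by_cases hxy : pvLt x y = true
    · simp only [PySem.List.insertBy, hxy, if_true]
      refine List.Pairwise.cons ?_ (List.Pairwise.cons hy hys)
      intro z hz
      rcases List.mem_cons.1 hz with rfl | hz
      · exact le_of_lt ((pvLt_iff x z).1 hxy)
      · exact le_trans (le_of_lt ((pvLt_iff x y).1 hxy)) (hy z hz)
    · have hxy' : pvLt x y = false := by revert hxy; cases pvLt x y <;> simp
      simp only [PySem.List.insertBy, hxy', Bool.false_eq_true, if_false]
      refine List.Pairwise.cons ?_ (IH hys)
      intro z hz
      rcases (PySem.List.mem_insertBy pvLt x z ys).1 hz with h | hz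
      · rw [h]; exact pvLe_of_not_lt x y hxy'
      · exact hy z hz

lemma sorted2_eq_foldl (xs : List (String × String)) :
    PySem.List.sorted2 xs (fun x => x.1) (fun x => x.2) false
      = xs.foldl (fun acc x => PySem.List.insertBy pvLt x acc) [] := rfl

lemma sorted2_pairwise_lex (xs : List (String × String)) :
    (PySem.List.sorted2 xs (fun x => x.1) (fun x => x.2) false).Pairwise
      (fun a b => toLex a ≤ toLex b) := by
  rw [sorted2_eq_foldl]
  suffices h : ∀ (acc : List (String × String)), acc.Pairwise (fun a b => toLex a ≤ toLex b) →
      (xs.foldl (fun acc x => PySem.List.insertBy pvLt x acc) acc).Pairwise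
        (fun a b => toLex a ≤ toLex b) from h [] (by simp)
  induction xs with
  | nil => intro acc hacc; simpa using hacc
  | cons a t IH => intro acc hacc; exact IH _ (insertBy_pairwise a acc hacc)

-- sorted2 is the unique lex-sorted rearrangement
lemma sorted2_eq_of_perm_of_pairwise (xs ys : List (String × String))
    (hperm : ys.Perm xs) (hpw : ys.Pairwise (fun a b => toLex a ≤ toLex b)) :
    PySem.List.sorted2 xs (fun x => x.1) (fun x => x.2) false = ys :=
  PySem.List.eq_of_perm_of_pairwise_le_of_injective
    (κ := Lex (String × String)) (toLex : String × String → Lex (String × String))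
    toLex.injective
    ((PySem.List.sorted2_perm xs _ _ false).trans hperm.symm)
    (sorted2_pairwise_lex xs) hpw

def pvVals (cards : List (String × String)) : List String :=
  PySem.List.sorted (PySem.Set.ofList (cards.map (fun c => c.1))) (fun x => x) false

def pvBlock (cards : List (String × String)) (v : String) : List (String × String) :=
  PySem.List.sorted2 (cards.filter (fun c => c.1 == v)) (fun x => x.1) (fun x => x.2) false

lemma mem_pvVals (cards : List (String × String)) (v : String) :
    v ∈ pvVals cards ↔ ∃ c ∈ cards, c.1 = v := by
  unfold pvVals
  rw [PySem.List.mem_sorted, PySem.Set.mem_ofList, List.mem_map]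

lemma pvVals_pairwise (cards : List (String × String)) :
    (pvVals cards).Pairwise (· < ·) :=
  PySem.List.sorted_ofList_pairwise_lt _

lemma mem_pvBlock (cards : List (String × String)) (v : String) (x : String × String) :
    x ∈ pvBlock cards v ↔ x ∈ cards ∧ x.1 = v := by
  unfold pvBlock
  rw [(PySem.List.sorted2_perm _ _ _ _).mem_iff, List.mem_filter]
  simp

lemma count_flatMap_filter (cards : List (String × String)) (a : String × String) :
    ∀ (vs : List String), vs.Nodup →
      (vs.flatMap (fun v => cards.filter (fun c => c.1 == v))).count a
        = if a.1 ∈ vs then cards.count a else 0 := by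
  intro vs
  induction vs with
  | nil => simp
  | cons v vs IH =>
    intro hnd
    rcases hnd with _ | ⟨hv, hnd⟩
    rw [List.flatMap_cons, List.count_append, IH hnd]
    by_cases hav : a.1 = v
    · have h1 : (cards.filter (fun c => c.1 == v)).count a = cards.count a :=
        List.count_filter (by simp [hav])
      have h2 : v ∉ vs := fun h => hv v h rfl
      simp [hav, h1, h2]
    · have h1 : (cards.filter (fun c => c.1 == v)).count a = 0 := by
        rw [List.count_eq_zero]
        intro h
        exact hav (by simpa using (List.mem_filter.1 h).2)
      simp [hav, h1]

lemma pvVals_nodup (cards : List (String × String)) : (pvVals cards).Nodup :=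
  (pvVals_pairwise cards).imp ne_of_lt

lemma perm_flatMap_blocks (cards : List (String × String)) :
    ((pvVals cards).flatMap (fun v => pvBlock cards v)).Perm cards := by
  have h1 : ((pvVals cards).flatMap (fun v => pvBlock cards v)).Perm
      ((pvVals cards).flatMap (fun v => cards.filter (fun c => c.1 == v))) := by
    induction pvVals cards with
    | nil => simp
    | cons v vs IH =>
      rw [List.flatMap_cons, List.flatMap_cons]
      exact (PySem.List.sorted2_perm _ _ _ _).append IH
  refine h1.trans (List.perm_iff_count.2 ?_)
  intro a
  rw [count_flatMap_filter cards a (pvVals cards) (pvVals_nodup cards)]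
  by_cases ha : a.1 ∈ pvVals cards
  · simp [ha]
  · have : a ∉ cards := fun h => ha ((mem_pvVals cards a.1).2 ⟨a, h, rfl⟩)
    simp [ha, List.count_eq_zero.2 this]

lemma pairwise_flatMap_blocks (cards : List (String × String)) :
    ((pvVals cards).flatMap (fun v => pvBlock cards v)).Pairwise
      (fun a b => toLex a ≤ toLex b) := by
  have hgen : ∀ (vs : List String), vs.Pairwise (· < ·) →
      (vs.flatMap (fun v => pvBlock cards v)).Pairwise (fun a b => toLex a ≤ toLex b) := by
    intro vs
    induction vs with
    | nil => intro _; simp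
    | cons v vs IH =>
      intro hpw
      rcases hpw with _ | ⟨hv, hvs⟩
      rw [List.flatMap_cons]
      refine (List.pairwise_append).2 ⟨sorted2_pairwise_lex _, IH hvs, ?_⟩
      intro x hx y hy
      have hx1 : x.1 = v := ((mem_pvBlock cards v x).1 hx).2
      obtain ⟨v', hv', hy'⟩ := List.mem_flatMap.1 hy
      have hy1 : y.1 = v' := ((mem_pvBlock cards v' y).1 hy').2
      have hlt : x.1 < y.1 := by rw [hx1, hy1]; exact hv v' hv'
      rw [Prod.Lex.le_iff]
      exact Or.inl hlt
  exact hgen (pvVals cards) (pvVals_pairwise cards)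

-- the global sort decomposes into the sorted buckets
lemma sorted2_decomp (cards : List (String × String)) :
    PySem.List.sorted2 cards (fun x => x.1) (fun x => x.2) false
      = (pvVals cards).flatMap (fun v => pvBlock cards v) :=
  sorted2_eq_of_perm_of_pairwise cards _ (perm_flatMap_blocks cards)
    (pairwise_flatMap_blocks cards)

-- the triple scan over the concatenated buckets is the windows of each bucket
lemma pvW_flatMap_blocks (cards : List (String × String)) :
    ∀ (vs : List String), vs.Pairwise (· < ·) → (∀ v ∈ vs, v ∈ pvVals cards) →
      pvW (vs.flatMap (fun v => pvBlock cards v))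
        = vs.flatMap (fun v => pvWins (pvBlock cards v)) := by
  intro vs
  induction vs with
  | nil => intro _ _; simp [pvW]
  | cons v vs IH =>
    intro hpw hmem
    rcases hpw with _ | ⟨hv, hvs⟩
    rw [List.flatMap_cons, List.flatMap_cons,
        pvW_append v (pvBlock cards v) (vs.flatMap (fun v => pvBlock cards v))
          (fun x hx => ((mem_pvBlock cards v x).1 hx).2) ?_,
        IH hvs (fun v' hv' => hmem v' (by simp [hv']))]
    intro b hb
    obtain ⟨v', hv', hb'⟩ := List.mem_flatMap.1 (List.mem_of_mem_head? hb)
    have : b.1 = v' := ((mem_pvBlock cards v' b).1 hb').2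
    rw [this]
    exact ne_of_gt (hv v' hv')

-- the zip-of-three-slices windows are pvWins
lemma zip_windows_drop (g : List (String × String)) :
    ((g.zip g.tail).zip (g.drop 2)).map (fun t => [t.1.1, t.1.2, t.2]) = pvWins g := by
  induction g with
  | nil => simp [pvWins]
  | cons a t IH =>
    rcases t with _ | ⟨b, _ | ⟨c, u⟩⟩
    · simp [pvWins]
    · simp [pvWins]
    · simp only [List.tail_cons, List.drop_succ_cons, List.drop_zero, List.zip_cons_cons,
        List.map_cons, pvWins] at IH ⊢
      rw [← IH]

lemma zip_windows (g : List (String × String)) :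
    ((g.zip (PySem.List.slice g (some 1) none)).zip (PySem.List.slice g (some 2) none)).map
      (fun t => [t.1.1, t.1.2, t.2]) = pvWins g := by
  have hs2 : PySem.List.slice g (some (2:Int)) none = g.drop 2 := by
    rw [PySem.List.slice_from g (a := 2) (by norm_num)]
    rfl
  rw [PySem.List.slice_from_one, hs2]
  exact zip_windows_drop g

-- ===== VERDICT (by name: the statement is the Claim_ definition above) =====
theorem findTrips_spec : Claim_equal_findTrips := by
  intro cards _
  show findTrips cards = findTrips_alt cards
  simp only [findTrips, findTrips_alt]
  rw [bridgeA, PySem.List.foldl_append_eq_flatMap, List.nil_append, sorted2_decomp,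
      pvW_flatMap_blocks cards (pvVals cards) (pvVals_pairwise cards) (fun _ h => h)]
  unfold pvVals
  congr 1
  funext v
  exact (zip_windows (pvBlock cards v)).symm
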